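-- pv_equiv track=rewrite | github.com/EII-Tokyo/openpi0.5-rtc | examples/aloha_real/create_droid_balanced_clip_lerobot_dataset.py | _allocate_clip_lengths
-- ===== SOURCE A (Python) =====
-- def _allocate_clip_lengths(num_frames: int, clip_length: int, min_clip_length: int) -> list[int]:
--     if clip_length < min_clip_length:
--         raise ValueError(f"clip_length={clip_length} must be >= min_clip_length={min_clip_length}")
--     lengths: list[int] = []
--     remaining = num_frames
--     while remaining > 0:
--         take = min(clip_length, remaining)
--         lengths.append(take)
--         remaining -= take
--     if not lengths:
--         return []
--     if lengths[-1] >= min_clip_length: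
--         return lengths
--     deficit = min_clip_length - lengths[-1]
--     for idx in range(len(lengths) - 2, -1, -1):
--         borrowable = lengths[idx] - min_clip_length
--         if borrowable <= 0:
--             continue
--         moved = min(borrowable, deficit)
--         lengths[idx] -= moved
--         lengths[-1] += moved
--         deficit -= moved
--         if deficit == 0:
--             break
--     if deficit > 0:
--         raise ValueError(
--             f"Unable to allocate exact num_frames={num_frames} into clips with min_clip_length={min_clip_length}. "
--             f"Try increasing num_frames or clip_length."
--         )
--     return lengths
-- ===== SOURCE B (Python) =====
-- def _allocate_clip_lengths(num_frames: int, clip_length: int, min_clip_length: int) -> list[int]: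
--     if clip_length < min_clip_length:
--         raise ValueError(f"clip_length={clip_length} must be >= min_clip_length={min_clip_length}")
--     if num_frames <= 0:
--         return []
--     full = (num_frames - 1) // clip_length          # number of complete clips before the last one
--     last = num_frames - full * clip_length          # natural last-clip size, in 1..clip_length
--     if last >= min_clip_length:
--         return [clip_length] * full + [last]
--     deficit = min_clip_length - last
--     cap = clip_length - min_clip_length             # how much each full clip can give up
--     if cap <= 0 or deficit > full * cap:
--         raise ValueError(
--             f"Unable to allocate exact num_frames={num_frames} into clips with min_clip_length={min_clip_length}. "
--             f"Try increasing num_frames or clip_length."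
--         )
--     q, rem = divmod(deficit, cap)
--     partial = [clip_length - rem] if rem else []
--     return ([clip_length] * (full - q - len(partial))
--             + partial
--             + [min_clip_length] * q
--             + [min_clip_length])
-- ===== Notes on version B (the rewrite author's own statement) =====
-- stated objective: alternative
-- what changed: Replaces A's frame-by-frame while loop plus the backward borrow loop with a closed-form computation: full/last via one floor division, and the borrowed layout via one divmod of the deficit by the per-clip capacity, assembled with list repetition.
import Mathlib
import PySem

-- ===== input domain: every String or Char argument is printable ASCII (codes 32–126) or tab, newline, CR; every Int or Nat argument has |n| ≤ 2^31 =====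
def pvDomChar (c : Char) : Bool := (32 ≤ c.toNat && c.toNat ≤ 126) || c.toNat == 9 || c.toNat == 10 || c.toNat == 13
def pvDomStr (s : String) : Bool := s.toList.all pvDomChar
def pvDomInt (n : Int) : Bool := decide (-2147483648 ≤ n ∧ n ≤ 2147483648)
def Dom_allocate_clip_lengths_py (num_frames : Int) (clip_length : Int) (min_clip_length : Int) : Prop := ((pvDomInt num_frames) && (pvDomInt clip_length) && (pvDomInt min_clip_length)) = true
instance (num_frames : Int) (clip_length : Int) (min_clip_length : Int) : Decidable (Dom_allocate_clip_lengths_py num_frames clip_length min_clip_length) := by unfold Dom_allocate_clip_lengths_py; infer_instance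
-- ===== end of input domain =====

-- B replaces A's frame-by-frame chunk loop and backward borrow loop with a closed-form
-- divmod-based layout (objective: alternative; return values proved equal on Pre_).

-- ===== PORT A =====
-- the while loop; fuel num_frames.toNat suffices whenever clip_length ≥ 1
-- (for clip_length ≤ 0 and remaining > 0 the Python loop diverges — excluded by Pre_)
def pvChunkLoop (fuel : Nat) (remaining clip : Int) : List Int :=
  match fuel with
  | 0 => []
  | Nat.succ f =>
    if remaining > 0 then
      let take := min clip remaining
      take :: pvChunkLoop f (remaining - take) clip
    else []

-- the 'for idx in range(len(lengths)-2, -1, -1)' borrow loop, with break on deficit == 0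
def pvBorrowLoop (idxs : List Int) (lengths : List Int) (deficit m : Int) : List Int × Int :=
  match idxs with
  | [] => (lengths, deficit)
  | idx :: rest =>
    let borrowable := PySem.List.pyGetD lengths idx 0 - m
    if borrowable ≤ 0 then pvBorrowLoop rest lengths deficit m
    else
      let moved := min borrowable deficit
      let l1 := PySem.List.pySetD lengths idx (PySem.List.pyGetD lengths idx 0 - moved)
      let l2 := PySem.List.pySetD l1 (-1) (PySem.List.pyGetD l1 (-1) 0 + moved)
      let d1 := deficit - moved
      if d1 = 0 then (l2, d1) else pvBorrowLoop rest l2 d1 m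

def allocate_clip_lengths_py (num_frames : Int) (clip_length : Int) (min_clip_length : Int) : List Int :=
  -- Python raises ValueError when clip_length < min_clip_length — excluded by Pre_
  let lengths := pvChunkLoop num_frames.toNat num_frames clip_length
  if lengths = [] then []
  else if PySem.List.pyGetD lengths (-1) 0 ≥ min_clip_length then lengths
  else
    let deficit := min_clip_length - PySem.List.pyGetD lengths (-1) 0
    let res := pvBorrowLoop (PySem.List.pyRange ((lengths.length : Int) - 2) (-1) (-1)) lengths deficit min_clip_length
    -- res.2 > 0 means Python raises ValueError — excluded by Pre_
    res.1

-- ===== PORT B =====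
def allocate_clip_lengths_py_alt (num_frames : Int) (clip_length : Int) (min_clip_length : Int) : List Int :=
  -- the two ValueError branches of B are excluded by Pre_
  if num_frames ≤ 0 then []
  else
    let full := PySem.Int.floordiv (num_frames - 1) clip_length
    let last := num_frames - full * clip_length
    if last ≥ min_clip_length then List.replicate full.toNat clip_length ++ [last]
    else
      let deficit := min_clip_length - last
      let cap := clip_length - min_clip_length
      let q := PySem.Int.floordiv deficit cap
      let rem := PySem.Int.mod deficit cap
      let par := if rem ≠ 0 then [clip_length - rem] else []
      List.replicate (full - q - (par.length : Int)).toNat clip_length ++ par ++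
        List.replicate q.toNat min_clip_length ++ [min_clip_length]

-- ===== PRECONDITION & SPEC =====
-- Pre_ is exactly where Python A returns: it excludes clip_length < min_clip_length and the
-- infeasible-deficit cases (both ValueError) and clip_length ≤ 0 with num_frames > 0 (there A's
-- while loop never terminates).
def Pre_allocate_clip_lengths_py (num_frames : Int) (clip_length : Int) (min_clip_length : Int) : Prop :=
  min_clip_length ≤ clip_length ∧
  (num_frames ≤ 0 ∨
    (1 ≤ clip_length ∧
      (min_clip_length ≤ num_frames - (PySem.Int.floordiv (num_frames - 1) clip_length) * clip_length ∨
       (min_clip_length < clip_length ∧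
        min_clip_length - (num_frames - (PySem.Int.floordiv (num_frames - 1) clip_length) * clip_length)
          ≤ (PySem.Int.floordiv (num_frames - 1) clip_length) * (clip_length - min_clip_length)))))
instance (num_frames : Int) (clip_length : Int) (min_clip_length : Int) : Decidable (Pre_allocate_clip_lengths_py num_frames clip_length min_clip_length) := by unfold Pre_allocate_clip_lengths_py; infer_instance

def pvWitness_allocate_clip_lengths_py : Int × Int × Int := (10, 4, 3)

def Spec_allocate_clip_lengths_py (num_frames : Int) (clip_length : Int) (min_clip_length : Int) (out : List Int) : Prop := out = allocate_clip_lengths_py_alt num_frames clip_length min_clip_length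
instance (num_frames : Int) (clip_length : Int) (min_clip_length : Int) (out : List Int) : Decidable (Spec_allocate_clip_lengths_py num_frames clip_length min_clip_length out) := by unfold Spec_allocate_clip_lengths_py; infer_instance

-- ===== CLAIM (what is proved, stated in full; the proofs are below) =====
def Claim_equal_allocate_clip_lengths_py : Prop := ∀ (num_frames : Int) (clip_length : Int) (min_clip_length : Int), Dom_allocate_clip_lengths_py num_frames clip_length min_clip_length → Pre_allocate_clip_lengths_py num_frames clip_length min_clip_length → Spec_allocate_clip_lengths_py num_frames clip_length min_clip_length (allocate_clip_lengths_py num_frames clip_length min_clip_length)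

-- ===== LEMMAS AND PROOFS =====

lemma pvGetD_rep (t : Nat) (c : Int) (L : List Int) :
    (List.replicate (t + 1) c ++ L).getD t 0 = c := by
  induction t with
  | zero => simp
  | succ n ih => simpa [List.replicate_succ] using ih

lemma pvSet_rep (t : Nat) (c v : Int) (L : List Int) :
    (List.replicate (t + 1) c ++ L).set t v = List.replicate t c ++ v :: L := by
  induction t with
  | zero => simp
  | succ n ih => simpa [List.replicate_succ] using ih

lemma pvSetD_last (L : List Int) (x v : Int) :
    PySem.List.pySetD (L ++ [x]) (-1) v = L ++ [v] := by
  simp [PySem.List.pySetD, PySem.List.pySet?, PySem.List.pyIdx?]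

lemma pvChunk_nil (fuel : Nat) (r c : Int) (h : r ≤ 0) : pvChunkLoop fuel r c = [] := by
  cases fuel with
  | zero => rfl
  | succ f => simp [pvChunkLoop, show ¬ r > 0 by omega]

lemma pvChunk_eq (c : Int) (hc : 1 ≤ c) :
    ∀ (t : Nat) (r : Int) (fuel : Nat), 1 ≤ r → r ≤ c → ((t : Int) * c + r).toNat ≤ fuel →
      pvChunkLoop fuel ((t : Int) * c + r) c = List.replicate t c ++ [r] := by
  intro t
  induction t with
  | zero =>
    intro r fuel h1 h2 hf
    simp only [Nat.cast_zero, zero_mul, zero_add] at hf ⊢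
    cases fuel with
    | zero => omega
    | succ f =>
      simp only [pvChunkLoop, show r > 0 by omega, if_true, min_eq_right h2]
      simp only [sub_self]
      simp [pvChunk_nil f 0 c (le_refl 0)]
  | succ t ih =>
    intro r fuel h1 h2 hf
    have hX : 0 ≤ (t : Int) * c + r := by nlinarith [Int.natCast_nonneg t]
    have hrem : ((t + 1 : Nat) : Int) * c + r = c + ((t : Int) * c + r) := by push_cast; ring
    rw [hrem] at hf ⊢
    cases fuel with
    | zero =>
      exfalso
      have h1' : (1 : Int) ≤ c + ((t : Int) * c + r) := by omega
      omega
    | succ f =>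
      have hpos : c + ((t : Int) * c + r) > 0 := by omega
      simp only [pvChunkLoop, hpos, if_true, min_eq_left (by omega : c ≤ c + ((t : Int) * c + r))]
      have : c + ((t : Int) * c + r) - c = (t : Int) * c + r := by ring
      rw [this, ih r f h1 h2 (by omega)]
      simp [List.replicate_succ]

lemma pvBorrow_eq (c m : Int) (hcap : 0 < c - m) :
    ∀ (q : Nat) (t : Nat) (suffix : List Int) (x rem : Int),
      0 ≤ rem → rem < c - m → 0 < (q : Int) * (c - m) + rem →
      q + (if 0 < rem then 1 else 0) ≤ t →
      pvBorrowLoop (PySem.List.pyRange ((t : Int) - 1) (-1) (-1))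
          (List.replicate t c ++ suffix ++ [x]) ((q : Int) * (c - m) + rem) m
        = (List.replicate (t - q - (if 0 < rem then 1 else 0)) c ++
            (if 0 < rem then [c - rem] else []) ++ List.replicate q m ++ suffix ++
            [x + ((q : Int) * (c - m) + rem)], 0) := by
  intro q
  induction q with
  | zero =>
    intro t suffix x rem h0 h1 hd hs
    have hd0 : ((0 : Nat) : Int) * (c - m) + rem = rem := by push_cast; ring
    rw [hd0] at hd ⊢
    have hrpos : 0 < rem := hd
    simp only [if_pos hrpos] at hs ⊢
    obtain ⟨t', rfl⟩ : ∃ t', t = t' + 1 := ⟨t - 1, by omega⟩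
    have he : ((t' + 1 : Nat) : Int) - 1 = (t' : Int) := by push_cast; ring
    rw [he, PySem.List.pyRange_neg_one_cons (by omega)]
    have hshape : List.replicate (t' + 1) c ++ suffix ++ [x]
        = List.replicate (t' + 1) c ++ (suffix ++ [x]) := by simp
    rw [hshape]
    simp only [pvBorrowLoop, PySem.List.pyGetD_natCast, pvGetD_rep,
      show ¬ c - m ≤ 0 by omega, if_false, PySem.List.pySetD_natCast, pvSet_rep]
    rw [min_eq_right (le_of_lt h1), sub_self]
    have hshape2 : List.replicate t' c ++ (c - rem) :: (suffix ++ [x])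
        = (List.replicate t' c ++ (c - rem) :: suffix) ++ [x] := by simp
    rw [hshape2, PySem.List.pyGetD_neg_one_append_singleton, pvSetD_last]
    simp [List.append_assoc]
  | succ q' ih =>
    intro t suffix x rem h0 h1 hd hs
    obtain ⟨t', rfl⟩ : ∃ t', t = t' + 1 := ⟨t - 1, by omega⟩
    have he : ((t' + 1 : Nat) : Int) - 1 = (t' : Int) := by push_cast; ring
    rw [he, PySem.List.pyRange_neg_one_cons (by omega)]
    have hshape : List.replicate (t' + 1) c ++ suffix ++ [x]
        = List.replicate (t' + 1) c ++ (suffix ++ [x]) := by simp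
    rw [hshape]
    have hq' : (0 : Int) ≤ (q' : Int) := Int.natCast_nonneg q'
    have hdlarge : c - m ≤ ((q' + 1 : Nat) : Int) * (c - m) + rem := by
      push_cast; nlinarith
    simp only [pvBorrowLoop, PySem.List.pyGetD_natCast, pvGetD_rep,
      show ¬ c - m ≤ 0 by omega, if_false, PySem.List.pySetD_natCast, pvSet_rep]
    rw [min_eq_left hdlarge]
    have hshape2 : List.replicate t' c ++ (c - (c - m)) :: (suffix ++ [x])
        = (List.replicate t' c ++ (c - (c - m)) :: suffix) ++ [x] := by simp
    rw [hshape2, PySem.List.pyGetD_neg_one_append_singleton, pvSetD_last]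
    have hcm : c - (c - m) = m := by ring
    have hd1 : ((q' + 1 : Nat) : Int) * (c - m) + rem - (c - m) = (q' : Int) * (c - m) + rem := by
      push_cast; ring
    rw [hcm, hd1]
    by_cases hz : (q' : Int) * (c - m) + rem = 0
    · -- q' = 0 and rem = 0: the loop breaks here
      have hA : 0 ≤ (q' : Int) * (c - m) := mul_nonneg hq' (le_of_lt hcap)
      have hr0 : rem = 0 := by linarith
      have hq0 : q' = 0 := by
        rcases mul_eq_zero.mp (by linarith : (q' : Int) * (c - m) = 0) with h | h
        · exact_mod_cast h
        · omega
      subst hq0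
      subst hr0
      rw [if_pos hz]
      simp [List.replicate_succ', List.append_assoc]
    · rw [if_neg hz]
      have hrec := ih t' (m :: suffix) (x + (c - m)) rem h0 h1
        (lt_of_le_of_ne (add_nonneg (mul_nonneg hq' (le_of_lt hcap)) h0) (Ne.symm hz)) (by
        split at hs <;> split <;> omega)
      rw [hrec]
      have h2' : x + (c - m) + ((q' : Int) * (c - m) + rem)
          = x + (((q' + 1 : Nat) : Int) * (c - m) + rem) := by push_cast; ring
      rw [h2']
      simp [Nat.succ_sub_succ, List.replicate_succ', List.append_assoc]

-- ===== VERDICT (by name: the statement is the Claim_ definition above) =====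
theorem allocate_clip_lengths_py_spec : Claim_equal_allocate_clip_lengths_py := by
  intro n c m _ pre
  unfold Spec_allocate_clip_lengths_py
  obtain ⟨hmc, hrest⟩ := pre
  by_cases hn : n ≤ 0
  · simp [allocate_clip_lengths_py, allocate_clip_lengths_py_alt, hn,
      Int.toNat_of_nonpos hn, pvChunkLoop]
  · have hn1 : 1 ≤ n := by omega
    rcases hrest with hn0 | ⟨hc1, hdisj⟩
    · omega
    have hfd : PySem.Int.floordiv (n - 1) c = (n - 1) / c :=
      PySem.Int.floordiv_eq_ediv_of_pos (by omega)
    set tZ : Int := (n - 1) / c with htZ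
    have hediv : c * tZ + (n - 1) % c = n - 1 := Int.ediv_add_emod _ _
    have hm0 : 0 ≤ (n - 1) % c := Int.emod_nonneg _ (by omega)
    have hm1 : (n - 1) % c < c := Int.emod_lt_of_pos _ (by omega)
    have htZ0 : 0 ≤ tZ := Int.ediv_nonneg (by omega) (by omega)
    set r : Int := n - tZ * c with hrdef
    have hrval : r = (n - 1) % c + 1 := by
      have : tZ * c = c * tZ := mul_comm _ _
      omega
    have hr1 : 1 ≤ r := by omega
    have hrc : r ≤ c := by omega
    set tn : Nat := tZ.toNat with htn
    have htcast : (tn : Int) = tZ := Int.toNat_of_nonneg htZ0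
    have hneq : (tn : Int) * c + r = n := by rw [htcast]; omega
    have hlen : pvChunkLoop n.toNat n c = List.replicate tn c ++ [r] := by
      have := pvChunk_eq c hc1 tn r n.toNat hr1 hrc (by rw [hneq])
      rwa [hneq] at this
    rw [hfd] at hdisj
    simp only [allocate_clip_lengths_py, allocate_clip_lengths_py_alt, hlen]
    rw [if_neg (by simp)]
    rw [PySem.List.pyGetD_neg_one_append_singleton]
    simp only [if_neg hn, hfd, ← hrdef]
    by_cases hrm : r ≥ m
    · rw [if_pos hrm, if_pos hrm, htn]
    · rw [if_neg hrm, if_neg hrm]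
      have hdisj' : m < c ∧ m - r ≤ tZ * (c - m) := by
        rcases hdisj with h | h
        · exact absurd h (by omega)
        · exact h
      obtain ⟨hcapc, hfeas⟩ := hdisj'
      have hcap : 0 < c - m := by omega
      set d : Int := m - r with hddef
      have hdpos : 0 < d := by omega
      have hfd2 : PySem.Int.floordiv d (c - m) = d / (c - m) :=
        PySem.Int.floordiv_eq_ediv_of_pos (by omega)
      have hmd2 : PySem.Int.mod d (c - m) = d % (c - m) :=
        PySem.Int.mod_eq_emod_of_pos (by omega)
      set qZ : Int := d / (c - m) with hqZ
      set rem : Int := d % (c - m) with hremdef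
      have hqed : (c - m) * qZ + rem = d := Int.ediv_add_emod _ _
      have hrem0 : 0 ≤ rem := Int.emod_nonneg _ (by omega)
      have hrem1 : rem < c - m := Int.emod_lt_of_pos _ (by omega)
      have hqZ0 : 0 ≤ qZ := Int.ediv_nonneg (by omega) (by omega)
      set qn : Nat := qZ.toNat with hqn
      have hqcast : (qn : Int) = qZ := Int.toNat_of_nonneg hqZ0
      have hqt : qZ ≤ tZ := by
        have h := Int.ediv_le_ediv hcap hfeas
        rwa [Int.mul_ediv_cancel _ (by omega : c - m ≠ 0)] at h
      have hqt' : 0 < rem → qZ < tZ := by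
        intro hr
        have hlt : (c - m) * qZ < (c - m) * tZ := by
          nlinarith [hqed, hfeas, mul_comm tZ (c - m)]
        exact lt_of_mul_lt_mul_left hlt (by omega)
      have hlenlen : ((List.replicate tn c ++ [r]).length : Int) - 2 = (tn : Int) - 1 := by
        simp; omega
      have hd_eq : d = (qn : Int) * (c - m) + rem := by
        rw [hqcast]; linarith [hqed, mul_comm (c - m) qZ]
      have hborrow := pvBorrow_eq c m hcap qn tn [] r rem hrem0 hrem1
        (by rw [← hd_eq]; exact hdpos)
        (by split <;> rename_i hsp
            · have := hqt' hsp; omega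
            · omega)
      rw [hlenlen]
      have hshape : List.replicate tn c ++ [] ++ [r] = List.replicate tn c ++ [r] := by simp
      rw [hshape, ← hd_eq] at hborrow
      rw [hborrow]
      have hrd : r + d = m := by omega
      -- now compare with B's expression
      by_cases hremp : 0 < rem
      · have hne : rem ≠ 0 := by omega
        simp only [hmd2, hfd2, if_pos hremp, if_pos hne, List.length_cons, List.length_nil]
        push_cast
        rw [hrd]
        simp [hqn, List.append_assoc,
          show (tZ - qZ - 1).toNat = tn - qn - 1 from by omega]
      · have hne : ¬ rem ≠ 0 := by omega
        simp only [hmd2, hfd2, if_neg hremp, if_neg hne, List.length_nil]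
        push_cast
        rw [hrd]
        simp [hqn, List.append_assoc,
          show (tZ - qZ).toNat = tn - qn from by omega]
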